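-- pv_equiv track=rewrite | github.com/cesarga-m/Showcase-Portfolio | Coding/Python/CS 303E/WordleAssistant.py | containsAll
-- ===== SOURCE A (Python) =====
-- def containsAll(wordlist, include):
--     """ Given your wordlist, return a set of all words from the wordlist
--     that contain all of the letters in the string include.
--     """
--
--     inlist = []
--     rlist = []
--     i = 0
--     count = 0
--
--     for j in include:   # goes through each letter of the include string and it appends each letter into a different
--         inlist.append(j)    # element in the inlist
--
--     for j in wordlist:  # goes through each word in wordlist and then goes through each element in the inlist, if the
--         for i in inlist:    # element is in the word the count increases by one, the the length of the inlist is
--             if i in j:      # compared to the count, if they are equal the word is appended, the count resets at the end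
--                 count = count + 1
--         if count == len(inlist):
--             rlist.append(j)
--         count = 0
--
--     inset = set(rlist)      # # makes the rlist a set, and returns this respective set
--     return inset
-- ===== SOURCE B (Python) =====
-- def containsAll(wordlist, include):
--     """Same result: intersect, per letter of include, the set of words containing it."""
--     result = set(wordlist)
--     for c in include:
--         result &= {w for w in wordlist if c in w}
--     return result
-- ===== Notes on version B (the rewrite author's own statement) =====
-- stated objective: alternative
-- what changed: B inverts the loop nesting: instead of counting matched letters per word, it seeds a set with all words and intersects it with the set of words containing each letter of include.
import Mathlib
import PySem

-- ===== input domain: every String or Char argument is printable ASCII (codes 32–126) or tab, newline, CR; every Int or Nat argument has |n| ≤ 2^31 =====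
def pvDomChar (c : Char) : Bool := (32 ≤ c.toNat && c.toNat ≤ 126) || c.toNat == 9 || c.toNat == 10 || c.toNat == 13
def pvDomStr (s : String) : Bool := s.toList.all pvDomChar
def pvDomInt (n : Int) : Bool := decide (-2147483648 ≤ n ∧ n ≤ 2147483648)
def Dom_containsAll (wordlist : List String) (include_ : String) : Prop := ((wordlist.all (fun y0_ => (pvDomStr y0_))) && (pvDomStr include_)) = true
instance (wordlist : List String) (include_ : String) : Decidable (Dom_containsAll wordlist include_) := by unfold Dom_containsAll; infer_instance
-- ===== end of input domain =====

-- B replaces A's per-word letter counting by a per-letter set-intersection accumulator; return-value equivalence only (A mutates nothing).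
-- ===== PORT A =====
def containsAll (wordlist : List String) (include_ : String) : List String :=
  let inlist := include_.toList.foldl (fun acc j => acc ++ [j]) []
  let rlist := wordlist.foldl (fun rlist j =>
    let count := inlist.foldl (fun count i => if i ∈ j.toList then count + 1 else count) 0
    if count = inlist.length then rlist ++ [j] else rlist) []
  PySem.Set.ofList rlist

-- ===== PORT B =====
def containsAll_alt (wordlist : List String) (include_ : String) : List String :=
  include_.toList.foldl
    (fun result c => PySem.Set.inter result (PySem.Set.ofList (wordlist.filter (fun w => c ∈ w.toList))))
    (PySem.Set.ofList wordlist)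

-- ===== PRECONDITION & SPEC =====
def Spec_containsAll (wordlist : List String) (include_ : String) (out : List String) : Prop := out = containsAll_alt wordlist include_
instance (wordlist : List String) (include_ : String) (out : List String) : Decidable (Spec_containsAll wordlist include_ out) := by unfold Spec_containsAll; infer_instance

-- ===== CLAIM (what is proved, stated in full; the proofs are below) =====
def Claim_equal_containsAll : Prop := ∀ (wordlist : List String) (include_ : String), Dom_containsAll wordlist include_ → Spec_containsAll wordlist include_ (containsAll wordlist include_)

-- ===== LEMMAS AND PROOFS =====

-- the list-building first loop of A is the identity on include_'s characters
theorem pv_foldl_push (l acc : List Char) : l.foldl (fun a j => a ++ [j]) acc = acc ++ l := by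
  induction l generalizing acc with
  | nil => simp
  | cons x xs ih => simp [List.foldl_cons, ih]

-- A's inner counting loop computes the length of the filtered list
theorem pv_foldl_count (P : Char → Prop) [DecidablePred P] (l : List Char) (n : Nat) :
    l.foldl (fun c i => if P i then c + 1 else c) n = n + (l.filter (fun i => decide (P i))).length := by
  induction l generalizing n with
  | nil => simp
  | cons x xs ih =>
    by_cases h : P x
    · simp only [List.foldl_cons, if_pos h, ih, List.filter_cons, decide_eq_true h]
      simp; omega
    · simp [List.foldl_cons, ih, h]

-- A's per-word test "count == len(inlist)" is "every letter of include occurs in the word"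
theorem pv_step_eq (include_ : String) :
    (fun (rlist : List String) (j : String) =>
        if include_.toList.foldl (fun count i => if i ∈ j.toList then count + 1 else count) 0 =
            include_.toList.length then rlist ++ [j] else rlist)
      = (fun rlist j => if include_.toList.all (fun c => decide (c ∈ j.toList)) then rlist ++ [j] else rlist) := by
  funext rlist j
  rw [pv_foldl_count]
  simp only [Nat.zero_add]
  by_cases h : ∀ c ∈ include_.toList, c ∈ j.toList
  · rw [if_pos, if_pos]
    · simpa using h
    · rw [List.length_filter_eq_length_iff]; simpa using h
  · rw [if_neg, if_neg]
    · simpa using h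
    · rw [List.length_filter_eq_length_iff]; simpa using h

-- A's word loop keeps exactly the words all of whose required letters occur
theorem pv_A_eq_filter (wordlist : List String) (include_ : String) :
    containsAll wordlist include_ =
      PySem.Set.ofList (wordlist.filter (fun w => include_.toList.all (fun c => decide (c ∈ w.toList)))) := by
  unfold containsAll
  simp only [pv_foldl_push, List.nil_append]
  rw [pv_step_eq, PySem.List.foldl_append_if_eq_filter]
  simp

-- ofList commutes with filter (dedup of a filtered list = filter of the dedup)
theorem pv_ofList_filter (p : String → Bool) (l : List String) :
    PySem.Set.ofList (l.filter p) = (PySem.Set.ofList l).filter p := by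
  induction l with
  | nil => rfl
  | cons x xs ih =>
    have hd : ∀ (s : List String) y, PySem.Set.discard s y = s.filter (fun z => !(z == y)) :=
      fun s y => rfl
    by_cases h : p x = true
    · rw [List.filter_cons, if_pos h, PySem.Set.ofList_cons, PySem.Set.ofList_cons, ih, hd, hd,
        List.filter_comm, List.filter_cons, if_pos h]
    · rw [List.filter_cons, if_neg (by simp [h]), PySem.Set.ofList_cons, ih,
        List.filter_cons, if_neg (by simp [h]), hd, List.filter_comm]
      refine (List.filter_eq_self.mpr ?_).symm
      intro a ha
      simp only [List.mem_filter] at ha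
      simp only [Bool.not_eq_eq_eq_not, Bool.not_true, beq_eq_false_iff_ne, ne_eq]
      rintro rfl
      simp [h] at ha

-- B's intersection step, applied to a subset of wordlist, is just a filter by the letter
theorem pv_inter_step (wordlist s : List String) (c : Char)
    (hs : ∀ w ∈ s, w ∈ wordlist) :
    PySem.Set.inter s (PySem.Set.ofList (wordlist.filter (fun w => c ∈ w.toList)))
      = s.filter (fun w => decide (c ∈ w.toList)) := by
  show s.filter _ = _
  apply List.filter_congr
  intro w hw
  simp only [PySem.Set.contains_eq_listContains]
  by_cases h : c ∈ w.toList
  · simp only [h, decide_true]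
    have : w ∈ PySem.Set.ofList (wordlist.filter (fun w => decide (c ∈ w.toList))) := by
      rw [PySem.Set.mem_ofList, List.mem_filter]
      exact ⟨hs w hw, by simpa using h⟩
    simpa using this
  · simp only [h, decide_false]
    have : w ∉ PySem.Set.ofList (wordlist.filter (fun w => decide (c ∈ w.toList))) := by
      rw [PySem.Set.mem_ofList, List.mem_filter]
      simp [h]
    simpa using this

-- B's fold over the letters filters by the conjunction of all letter tests
theorem pv_B_fold (wordlist : List String) (cs : List Char) (s : List String)
    (hs : ∀ w ∈ s, w ∈ wordlist) :
    cs.foldl (fun result c =>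
        PySem.Set.inter result (PySem.Set.ofList (wordlist.filter (fun w => c ∈ w.toList)))) s
      = s.filter (fun w => cs.all (fun c => decide (c ∈ w.toList))) := by
  induction cs generalizing s with
  | nil => simp
  | cons c cs ih =>
    rw [List.foldl_cons, pv_inter_step wordlist s c hs, ih]
    · rw [List.filter_filter]
      apply List.filter_congr
      intro w _
      simp [Bool.and_comm]
    · intro w hw
      exact hs w (List.mem_filter.mp hw).1

-- ===== VERDICT (by name: the statement is the Claim_ definition above) =====
theorem containsAll_spec : Claim_equal_containsAll := by
  intro wordlist include_ _
  unfold Spec_containsAll containsAll_alt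
  rw [pv_A_eq_filter, pv_ofList_filter,
      pv_B_fold wordlist include_.toList (PySem.Set.ofList wordlist)
        (fun w hw => (PySem.Set.mem_ofList _ _).mp hw)]
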